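-- pv_equiv track=rewrite | github.com/abbasmoosajee07/AdventofCode | 2020/16/2020Day16.py | find_invalid_tickets
-- ===== SOURCE A (Python) =====
-- def is_valid_for_any_rule(number, rules):
--     for ranges in rules.values():
--         for r_start, r_end in ranges:
--             if r_start <= number <= r_end:
--                 return True
--     return False
--
-- def find_invalid_tickets(tickets, rules):
--     invalid_numbers = []
--     valid_tickets = []
--     for ticket in tickets:
--         ticket_valid = True
--         for number in ticket:
--             if not is_valid_for_any_rule(number, rules):
--                 invalid_numbers.append(number)
--                 ticket_valid = False
--         if ticket_valid:
--             valid_tickets.append(ticket)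
--     return invalid_numbers, valid_tickets
-- ===== SOURCE B (Python) =====
-- def find_invalid_tickets(tickets, rules):
--     # Merge all rule ranges once into a sorted disjoint interval list,
--     # then check each number against the merged list with early exit.
--     ivs = sorted((iv for ranges in rules.values() for iv in ranges),
--                  key=lambda iv: iv[0])
--     merged = []
--     cur = None
--     for a, b in ivs:
--         if cur is None:
--             cur = (a, b)
--         elif a <= cur[1]:
--             cur = (cur[0], max(cur[1], b))
--         else:
--             merged.append(cur)
--             cur = (a, b)
--     if cur is not None:
--         merged.append(cur)
--
--     def covered(x):
--         for a, b in merged: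
--             if a > x:
--                 return False
--             if x <= b:
--                 return True
--         return False
--
--     invalid_numbers = []
--     valid_tickets = []
--     for ticket in tickets:
--         bad = [n for n in ticket if not covered(n)]
--         invalid_numbers.extend(bad)
--         if not bad:
--             valid_tickets.append(ticket)
--     return invalid_numbers, valid_tickets
-- ===== Notes on version B (the rewrite author's own statement) =====
-- stated objective: faster
-- what changed: B merges all rule ranges once into a sorted list of disjoint intervals and checks each ticket number against that short merged list with early exit, instead of rescanning every range of every rule for every number.
import Mathlib
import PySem

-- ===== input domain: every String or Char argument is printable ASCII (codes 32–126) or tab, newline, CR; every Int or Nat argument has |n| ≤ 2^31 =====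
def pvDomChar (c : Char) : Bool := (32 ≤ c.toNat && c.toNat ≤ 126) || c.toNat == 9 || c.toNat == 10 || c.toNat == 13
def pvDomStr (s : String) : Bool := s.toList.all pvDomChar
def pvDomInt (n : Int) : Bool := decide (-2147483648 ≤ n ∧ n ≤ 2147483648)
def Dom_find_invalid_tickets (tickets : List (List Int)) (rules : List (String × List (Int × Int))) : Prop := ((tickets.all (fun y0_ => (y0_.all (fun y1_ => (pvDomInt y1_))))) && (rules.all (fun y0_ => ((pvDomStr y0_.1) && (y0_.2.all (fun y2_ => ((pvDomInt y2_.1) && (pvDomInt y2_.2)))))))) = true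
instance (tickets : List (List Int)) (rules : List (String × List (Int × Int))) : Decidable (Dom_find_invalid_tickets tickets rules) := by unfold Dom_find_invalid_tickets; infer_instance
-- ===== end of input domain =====

-- B merges all rule ranges once into a sorted disjoint interval list and checks each
-- number against that short list with early exit, instead of scanning every rule range
-- per number (objective: faster by precomputation).

-- ===== PORT A =====
-- inner for-loop of is_valid_for_any_rule (early return True)
def pvValidRanges (number : Int) : List (Int × Int) → Bool
  | [] => false
  | (a, b) :: rs => if a ≤ number ∧ number ≤ b then true else pvValidRanges number rs

-- for ranges in rules.values(): …
def is_valid_for_any_rule (number : Int) : List (String × List (Int × Int)) → Bool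
  | [] => false
  | (_, ranges) :: rest =>
      if pvValidRanges number ranges then true else is_valid_for_any_rule number rest

-- inner loop over one ticket: state (invalid_numbers, ticket_valid)
def pvALoopTicket (rules : List (String × List (Int × Int))) (inv : List Int) (flag : Bool) :
    List Int → List Int × Bool
  | [] => (inv, flag)
  | n :: ns =>
      if is_valid_for_any_rule n rules then pvALoopTicket rules inv flag ns
      else pvALoopTicket rules (inv ++ [n]) false ns

-- outer loop over tickets: state (invalid_numbers, valid_tickets)
def pvALoop (rules : List (String × List (Int × Int))) (inv : List Int)
    (valid : List (List Int)) : List (List Int) → List Int × List (List Int)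
  | [] => (inv, valid)
  | t :: ts =>
      let r := pvALoopTicket rules inv true t
      pvALoop rules r.1 (if r.2 then valid ++ [t] else valid) ts

def find_invalid_tickets (tickets : List (List Int)) (rules : List (String × List (Int × Int))) : List Int × List (List Int) :=
  pvALoop rules [] [] tickets

-- ===== PORT B =====
-- the merge loop of Source B: state (merged, cur)
def pvMergeLoop (merged : List (Int × Int)) (cur : Option (Int × Int)) :
    List (Int × Int) → List (Int × Int)
  | [] => match cur with
          | none => merged
          | some c => merged ++ [c]
  | (a, b) :: rest =>
      match cur with
      | none => pvMergeLoop merged (some (a, b)) rest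
      | some (ca, cb) =>
          if a ≤ cb then pvMergeLoop merged (some (ca, max cb b)) rest
          else pvMergeLoop (merged ++ [(ca, cb)]) (some (a, b)) rest

-- covered(x): early-exit scan of the merged sorted intervals
def pvCovered (x : Int) : List (Int × Int) → Bool
  | [] => false
  | (a, b) :: rest => if a > x then false else if x ≤ b then true else pvCovered x rest

-- loop over tickets in Source B
def pvBLoop (merged : List (Int × Int)) (inv : List Int) (valid : List (List Int)) :
    List (List Int) → List Int × List (List Int)
  | [] => (inv, valid)
  | t :: ts =>
      let bad := t.filter (fun n => !pvCovered n merged)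
      pvBLoop merged (inv ++ bad) (if bad.isEmpty then valid ++ [t] else valid) ts

def find_invalid_tickets_alt (tickets : List (List Int)) (rules : List (String × List (Int × Int))) : List Int × List (List Int) :=
  let ivs := PySem.List.sorted (rules.flatMap (fun r => r.2)) (fun iv => iv.1) false
  let merged := pvMergeLoop [] none ivs
  pvBLoop merged [] [] tickets

-- ===== PRECONDITION & SPEC =====
def Spec_find_invalid_tickets (tickets : List (List Int)) (rules : List (String × List (Int × Int))) (out : List Int × List (List Int)) : Prop := out = find_invalid_tickets_alt tickets rules
instance (tickets : List (List Int)) (rules : List (String × List (Int × Int))) (out : List Int × List (List Int)) : Decidable (Spec_find_invalid_tickets tickets rules out) := by unfold Spec_find_invalid_tickets; infer_instance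

-- ===== CLAIM (what is proved, stated in full; the proofs are below) =====
def Claim_equal_find_invalid_tickets : Prop := ∀ (tickets : List (List Int)) (rules : List (String × List (Int × Int))), Dom_find_invalid_tickets tickets rules → Spec_find_invalid_tickets tickets rules (find_invalid_tickets tickets rules)

-- ===== LEMMAS AND PROOFS =====

-- x is inside some interval of l
def pvCover (l : List (Int × Int)) (x : Int) : Prop := ∃ p ∈ l, p.1 ≤ x ∧ x ≤ p.2

lemma pvValidRanges_iff (x : Int) (rs : List (Int × Int)) :
    pvValidRanges x rs = true ↔ pvCover rs x := by
  induction rs with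
  | nil => simp [pvValidRanges, pvCover]
  | cons p rs ih =>
    obtain ⟨a, b⟩ := p
    by_cases h : a ≤ x ∧ x ≤ b
    · have hstep : pvValidRanges x ((a, b) :: rs) = true := by
        simp [pvValidRanges, h.1, h.2]
      rw [hstep]
      simp only [true_iff]
      exact ⟨(a, b), by simp, by simpa using h⟩
    · have hstep : pvValidRanges x ((a, b) :: rs) = pvValidRanges x rs := by
        simp [pvValidRanges, h]
      rw [hstep, ih]
      unfold pvCover
      constructor
      · rintro ⟨p, hm, hx⟩; exact ⟨p, by simp [hm], hx⟩
      · rintro ⟨p, hm, hx⟩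
        simp at hm
        rcases hm with hm | hm
        · obtain ⟨u, v⟩ := p; simp at hm hx
          exact absurd (by omega : a ≤ x ∧ x ≤ b) h
        · exact ⟨p, hm, hx⟩

lemma is_valid_iff (x : Int) (rules : List (String × List (Int × Int))) :
    is_valid_for_any_rule x rules = true ↔ pvCover (rules.flatMap (fun r => r.2)) x := by
  induction rules with
  | nil => simp [is_valid_for_any_rule, pvCover]
  | cons r rest ih =>
    obtain ⟨name, rs⟩ := r
    by_cases h : pvValidRanges x rs = true
    · have hstep : is_valid_for_any_rule x ((name, rs) :: rest) = true := by
        simp [is_valid_for_any_rule, h]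
      rw [hstep]
      simp only [true_iff]
      obtain ⟨p, hp, hx⟩ := (pvValidRanges_iff x rs).mp h
      exact ⟨p, List.flatMap_cons .. ▸ List.mem_append.mpr (Or.inl hp), hx⟩
    · have hstep : is_valid_for_any_rule x ((name, rs) :: rest) = is_valid_for_any_rule x rest := by
        simp [is_valid_for_any_rule, h]
      rw [hstep, ih]
      rw [pvValidRanges_iff] at h
      unfold pvCover at h ⊢
      constructor
      · rintro ⟨p, hm, hx⟩
        exact ⟨p, List.flatMap_cons .. ▸ List.mem_append.mpr (Or.inr hm), hx⟩
      · rintro ⟨p, hm, hx⟩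
        rw [List.flatMap_cons] at hm
        rcases List.mem_append.mp hm with hm | hm
        · exact absurd ⟨p, hm, hx⟩ h
        · exact ⟨p, hm, hx⟩

lemma cover_perm {l l' : List (Int × Int)} (h : l.Perm l') (x : Int) :
    pvCover l x ↔ pvCover l' x := by
  unfold pvCover
  constructor <;> rintro ⟨p, hp, hx⟩
  · exact ⟨p, h.mem_iff.mp hp, hx⟩
  · exact ⟨p, h.mem_iff.mpr hp, hx⟩

-- coverage of the merge loop's output
lemma mergeLoop_cover (x : Int) :
    ∀ (l : List (Int × Int)) (merged : List (Int × Int)) (ca cb : Int),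
      (∀ p ∈ l, ca ≤ p.1) → l.Pairwise (fun p q => p.1 ≤ q.1) →
      (pvCover (pvMergeLoop merged (some (ca, cb)) l) x ↔
        pvCover merged x ∨ (ca ≤ x ∧ x ≤ cb) ∨ pvCover l x) := by
  intro l
  induction l with
  | nil =>
    intro merged ca cb _ _
    simp only [pvMergeLoop]
    unfold pvCover
    constructor
    · rintro ⟨p, hm, hx⟩
      simp at hm
      rcases hm with hm | hm
      · exact Or.inl ⟨p, hm, hx⟩
      · subst hm; exact Or.inr (Or.inl hx)
    · rintro (⟨p, hm, hx⟩ | hx | ⟨p, hm, _⟩)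
      · exact ⟨p, by simp [hm], hx⟩
      · exact ⟨(ca, cb), by simp, hx⟩
      · simp at hm
  | cons p rest ih =>
    intro merged ca cb hle hpw
    obtain ⟨a, b⟩ := p
    have hca : ca ≤ a := hle (a, b) (by simp)
    have hrest_le : ∀ q ∈ rest, a ≤ q.1 := by
      intro q hq; exact (List.pairwise_cons.mp hpw).1 q hq
    have hrest_pw : rest.Pairwise (fun p q => p.1 ≤ q.1) := (List.pairwise_cons.mp hpw).2
    by_cases h : a ≤ cb
    · have hstep : pvMergeLoop merged (some (ca, cb)) ((a, b) :: rest) =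
          pvMergeLoop merged (some (ca, max cb b)) rest := by
        simp [pvMergeLoop, h]
      rw [hstep, ih merged ca (max cb b) (fun q hq => le_trans hca (hrest_le q hq)) hrest_pw]
      constructor
      · rintro (hm | ⟨h1, h2⟩ | hc)
        · exact Or.inl hm
        · by_cases hx : x ≤ cb
          · exact Or.inr (Or.inl ⟨h1, hx⟩)
          · refine Or.inr (Or.inr ?_)
            exact ⟨(a, b), by simp, by simp; omega⟩
        · refine Or.inr (Or.inr ?_)
          obtain ⟨p, hm, hx⟩ := hc
          exact ⟨p, by simp; right; exact hm, hx⟩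
      · rintro (hm | ⟨h1, h2⟩ | hc)
        · exact Or.inl hm
        · exact Or.inr (Or.inl ⟨h1, by omega⟩)
        · obtain ⟨p, hm, hx⟩ := hc
          simp at hm
          rcases hm with hm | hm
          · obtain ⟨u, v⟩ := p
            simp at hm hx
            exact Or.inr (Or.inl ⟨by omega, by omega⟩)
          · exact Or.inr (Or.inr ⟨p, hm, hx⟩)
    · have hstep : pvMergeLoop merged (some (ca, cb)) ((a, b) :: rest) =
          pvMergeLoop (merged ++ [(ca, cb)]) (some (a, b)) rest := by
        simp [pvMergeLoop, h]
      rw [hstep, ih (merged ++ [(ca, cb)]) a b hrest_le hrest_pw]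
      unfold pvCover
      constructor
      · rintro (⟨p, hm, hx⟩ | hx | hc)
        · simp at hm
          rcases hm with hm | hm
          · exact Or.inl ⟨p, hm, hx⟩
          · subst hm; exact Or.inr (Or.inl hx)
        · exact Or.inr (Or.inr ⟨(a, b), by simp, hx⟩)
        · obtain ⟨p, hm, hx⟩ := hc
          exact Or.inr (Or.inr ⟨p, by simp [hm], hx⟩)
      · rintro (⟨p, hm, hx⟩ | hx | ⟨p, hm, hx⟩)
        · exact Or.inl ⟨p, by simp [hm], hx⟩
        · exact Or.inl ⟨(ca, cb), by simp, hx⟩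
        · simp at hm
          rcases hm with hm | hm
          · obtain ⟨u, v⟩ := p
            simp at hm hx
            exact Or.inr (Or.inl (by omega))
          · exact Or.inr (Or.inr ⟨p, hm, hx⟩)

lemma merge_cover (x : Int) (l : List (Int × Int))
    (hpw : l.Pairwise (fun p q => p.1 ≤ q.1)) :
    pvCover (pvMergeLoop [] none l) x ↔ pvCover l x := by
  cases l with
  | nil => simp [pvMergeLoop]
  | cons p rest =>
    obtain ⟨a, b⟩ := p
    have hstep : pvMergeLoop [] none ((a, b) :: rest) =
        pvMergeLoop [] (some (a, b)) rest := rfl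
    rw [hstep, mergeLoop_cover x rest [] a b
      (fun q hq => (List.pairwise_cons.mp hpw).1 q hq) (List.pairwise_cons.mp hpw).2]
    unfold pvCover
    constructor
    · rintro (⟨p, hm, hx⟩ | hx | ⟨p, hm, hx⟩)
      · simp at hm
      · exact ⟨(a, b), by simp, hx⟩
      · exact ⟨p, by simp [hm], hx⟩
    · rintro ⟨p, hm, hx⟩
      simp at hm
      rcases hm with hm | hm
      · obtain ⟨u, v⟩ := p
        simp at hm hx
        exact Or.inr (Or.inl (by omega))
      · exact Or.inr (Or.inr ⟨p, hm, hx⟩)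

-- the merge loop's output has nondecreasing starts
lemma mergeLoop_pairwise :
    ∀ (l : List (Int × Int)) (merged : List (Int × Int)) (ca cb : Int),
      merged.Pairwise (fun p q => p.1 ≤ q.1) → (∀ p ∈ merged, p.1 ≤ ca) →
      (∀ p ∈ l, ca ≤ p.1) → l.Pairwise (fun p q => p.1 ≤ q.1) →
      (pvMergeLoop merged (some (ca, cb)) l).Pairwise (fun p q => p.1 ≤ q.1) := by
  intro l
  induction l with
  | nil =>
    intro merged ca cb hmp hmle _ _
    simp only [pvMergeLoop]
    rw [List.pairwise_append]
    exact ⟨hmp, by simp, by intro p hp q hq; simp at hq; subst hq; exact hmle p hp⟩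
  | cons p rest ih =>
    intro merged ca cb hmp hmle hle hpw
    obtain ⟨a, b⟩ := p
    have hca : ca ≤ a := hle (a, b) (by simp)
    have hrest_le : ∀ q ∈ rest, a ≤ q.1 := fun q hq => (List.pairwise_cons.mp hpw).1 q hq
    have hrest_pw : rest.Pairwise (fun p q => p.1 ≤ q.1) := (List.pairwise_cons.mp hpw).2
    by_cases h : a ≤ cb
    · have hstep : pvMergeLoop merged (some (ca, cb)) ((a, b) :: rest) =
          pvMergeLoop merged (some (ca, max cb b)) rest := by
        simp [pvMergeLoop, h]
      rw [hstep]
      exact ih merged ca (max cb b) hmp hmle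
        (fun q hq => le_trans hca (hrest_le q hq)) hrest_pw
    · have hstep : pvMergeLoop merged (some (ca, cb)) ((a, b) :: rest) =
          pvMergeLoop (merged ++ [(ca, cb)]) (some (a, b)) rest := by
        simp [pvMergeLoop, h]
      rw [hstep]
      refine ih (merged ++ [(ca, cb)]) a b ?_ ?_ hrest_le hrest_pw
      · rw [List.pairwise_append]
        exact ⟨hmp, by simp, by intro p hp q hq; simp at hq; subst hq; exact hmle p hp⟩
      · intro p hp
        simp at hp
        rcases hp with hp | hp
        · exact le_trans (hmle p hp) hca
        · subst hp; exact hca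

lemma merge_pairwise (l : List (Int × Int)) (hpw : l.Pairwise (fun p q => p.1 ≤ q.1)) :
    (pvMergeLoop [] none l).Pairwise (fun p q => p.1 ≤ q.1) := by
  cases l with
  | nil => simp [pvMergeLoop]
  | cons p rest =>
    obtain ⟨a, b⟩ := p
    have hstep : pvMergeLoop [] none ((a, b) :: rest) =
        pvMergeLoop [] (some (a, b)) rest := rfl
    rw [hstep]
    exact mergeLoop_pairwise rest [] a b (by simp) (by simp)
      (fun q hq => (List.pairwise_cons.mp hpw).1 q hq) (List.pairwise_cons.mp hpw).2

-- early-exit scan on a start-sorted list decides coverage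
lemma covered_iff (x : Int) (l : List (Int × Int))
    (hpw : l.Pairwise (fun p q => p.1 ≤ q.1)) :
    pvCovered x l = true ↔ pvCover l x := by
  induction l with
  | nil => simp [pvCovered, pvCover]
  | cons p rest ih =>
    obtain ⟨a, b⟩ := p
    have hrest := ih (List.pairwise_cons.mp hpw).2
    have hle := (List.pairwise_cons.mp hpw).1
    by_cases h1 : a > x
    · have hstep : pvCovered x ((a, b) :: rest) = false := by simp [pvCovered, h1]
      rw [hstep]
      simp only [Bool.false_eq_true, false_iff]
      rintro ⟨p, hm, hx⟩
      simp at hm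
      rcases hm with hm | hm
      · obtain ⟨u, v⟩ := p; simp at hm hx; omega
      · have := hle p hm; obtain ⟨u, v⟩ := p; simp at hx this; omega
    · by_cases h2 : x ≤ b
      · have hstep : pvCovered x ((a, b) :: rest) = true := by simp [pvCovered, h1, h2]
        rw [hstep]
        simp only [true_iff]
        exact ⟨(a, b), by simp, by simp; omega⟩
      · have hstep : pvCovered x ((a, b) :: rest) = pvCovered x rest := by
          simp [pvCovered, h1, h2]
        rw [hstep, hrest]
        unfold pvCover
        constructor
        · rintro ⟨p, hm, hx⟩; exact ⟨p, by simp [hm], hx⟩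
        · rintro ⟨p, hm, hx⟩
          simp at hm
          rcases hm with hm | hm
          · obtain ⟨u, v⟩ := p; simp at hm hx; omega
          · exact ⟨p, hm, hx⟩

-- the precomputed check agrees with A's per-number rule scan
lemma covered_eq_valid (rules : List (String × List (Int × Int))) (x : Int) :
    pvCovered x (pvMergeLoop [] none
        (PySem.List.sorted (rules.flatMap (fun r => r.2)) (fun iv => iv.1) false)) =
      is_valid_for_any_rule x rules := by
  set flat := rules.flatMap (fun r => r.2) with hflat
  set s := PySem.List.sorted flat (fun iv => iv.1) false with hs
  have hpw : s.Pairwise (fun p q => p.1 ≤ q.1) := PySem.List.sorted_pairwise flat _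
  have hperm : s.Perm flat := PySem.List.sorted_perm flat _ _
  have h1 : pvCovered x (pvMergeLoop [] none s) = true ↔ pvCover flat x := by
    rw [covered_iff x _ (merge_pairwise s hpw), merge_cover x s hpw, cover_perm hperm]
  rw [← is_valid_iff] at h1
  cases hv : is_valid_for_any_rule x rules <;>
    cases hc : pvCovered x (pvMergeLoop [] none s) <;> simp_all

-- A's inner ticket loop in closed form
lemma aLoopTicket_eq (rules : List (String × List (Int × Int))) :
    ∀ (t : List Int) (inv : List Int) (flag : Bool),
      pvALoopTicket rules inv flag t =
        (inv ++ t.filter (fun n => !is_valid_for_any_rule n rules),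
         flag && (t.filter (fun n => !is_valid_for_any_rule n rules)).isEmpty) := by
  intro t
  induction t with
  | nil => intro inv flag; simp [pvALoopTicket]
  | cons n ns ih =>
    intro inv flag
    by_cases h : is_valid_for_any_rule n rules = true
    · simp [pvALoopTicket, h, ih]
    · have hstep : pvALoopTicket rules inv flag (n :: ns) =
          pvALoopTicket rules (inv ++ [n]) false ns := by
        simp [pvALoopTicket, h]
      rw [hstep, ih]
      simp [h, List.isEmpty]

-- the outer loops agree
lemma loops_eq (rules : List (String × List (Int × Int))) :
    ∀ (ts : List (List Int)) (inv : List Int) (valid : List (List Int)),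
      pvALoop rules inv valid ts =
        pvBLoop (pvMergeLoop [] none
          (PySem.List.sorted (rules.flatMap (fun r => r.2)) (fun iv => iv.1) false))
          inv valid ts := by
  intro ts
  induction ts with
  | nil => intro inv valid; simp [pvALoop, pvBLoop]
  | cons t rest ih =>
    intro inv valid
    have hfil : t.filter (fun n => !pvCovered n (pvMergeLoop [] none
        (PySem.List.sorted (rules.flatMap (fun r => r.2)) (fun iv => iv.1) false))) =
        t.filter (fun n => !is_valid_for_any_rule n rules) := by
      apply List.filter_congr
      intro n _
      rw [covered_eq_valid]
    simp only [pvALoop, pvBLoop, aLoopTicket_eq, hfil, Bool.true_and]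
    exact ih _ _

-- ===== VERDICT (by name: the statement is the Claim_ definition above) =====
theorem find_invalid_tickets_spec : Claim_equal_find_invalid_tickets := by
  intro tickets rules _
  unfold Spec_find_invalid_tickets find_invalid_tickets find_invalid_tickets_alt
  exact loops_eq rules tickets [] []
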